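-- pv_equiv track=rewrite | github.com/sosm/short-url | shorturl.py | url2id
-- ===== SOURCE A (Python) =====
-- URL_FIRST_BITS = 5
--
-- URL_FIRST = 'ABCDEFGHIJKLMNOPQRSTUVWXYZ012345'
--
-- URL_OTHERS_BITS = 6
--
-- URL_OTHERS = 'ABCDEFGHIJKLMNOPQRSTUVWXYZ_abcdefghijklmnopqrstuvwxyz0123456789-'
--
-- def url2id(url):
--     out = 0
--     for c in url[:0:-1]:
--         newid = URL_OTHERS.find(c)
--         if newid < 0:
--             return None
--         out = (out << URL_OTHERS_BITS) + newid
--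
--     out = (out << URL_FIRST_BITS) + URL_FIRST.find(url[0])
--     if out < 0:
--         return None
--
--
--     return out
-- ===== SOURCE B (Python) =====
-- URL_FIRST_BITS = 5
--
-- URL_FIRST = 'ABCDEFGHIJKLMNOPQRSTUVWXYZ012345'
--
-- URL_OTHERS_BITS = 6
--
-- URL_OTHERS = 'ABCDEFGHIJKLMNOPQRSTUVWXYZ_abcdefghijklmnopqrstuvwxyz0123456789-'
--
-- def url2id(url):
--     result = URL_FIRST.find(url[0])
--     shift = URL_FIRST_BITS
--     for c in url[1:]:
--         v = URL_OTHERS.find(c)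
--         if v < 0:
--             return None
--         result += v << shift
--         shift += URL_OTHERS_BITS
--     return result if result >= 0 else None
-- ===== Notes on version B (the rewrite author's own statement) =====
-- stated objective: alternative
-- what changed: Replaces A's Horner shift-accumulate over the reversed tail (url[:0:-1]) with a single forward left-to-right pass that starts from the first character's value and adds each later character's value shifted by a running positional weight.
import Mathlib
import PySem

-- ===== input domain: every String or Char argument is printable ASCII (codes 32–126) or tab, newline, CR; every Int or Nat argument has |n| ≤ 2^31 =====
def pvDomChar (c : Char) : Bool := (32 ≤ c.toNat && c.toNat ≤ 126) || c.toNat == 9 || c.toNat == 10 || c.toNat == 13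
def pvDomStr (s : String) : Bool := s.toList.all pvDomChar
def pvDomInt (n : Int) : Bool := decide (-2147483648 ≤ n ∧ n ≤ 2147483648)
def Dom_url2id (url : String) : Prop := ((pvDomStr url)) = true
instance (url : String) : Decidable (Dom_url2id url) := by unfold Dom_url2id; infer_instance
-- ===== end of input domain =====

-- B replaces A's reversed-tail Horner accumulation with a forward pass adding
-- positionally weighted character values (objective: alternative decomposition, same cost).

-- ===== PORT A =====
def urlFirstChars : List Char := "ABCDEFGHIJKLMNOPQRSTUVWXYZ012345".toList
def urlOthersChars : List Char :=
  "ABCDEFGHIJKLMNOPQRSTUVWXYZ_abcdefghijklmnopqrstuvwxyz0123456789-".toList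

-- the 'for c in url[:0:-1]' loop of A; 'out << 6' is written 'out * 64' (out is
-- nonnegative throughout, where Python's << is exactly multiplication by 2^6)
def url2idLoopA : List Char → Int → Option Int
  | [], out => some out
  | c :: rest, out =>
    let newid := PySem.Chars.find urlOthersChars [c]
    if newid < 0 then none
    else url2idLoopA rest (out * 64 + newid)

def url2id (url : String) : Option Int :=
  let cs := url.toList
  -- url[:0:-1]; slice? never returns none for step -1 (the getD default is unreachable)
  match url2idLoopA ((PySem.List.slice? cs none (some 0) (-1)).getD []) 0 with
  | none => none
  | some out =>
    match PySem.List.pyGet? cs 0 with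
    | none => none  -- url[0] raises IndexError in Python; excluded by Pre_url2id
    | some c0 =>
      -- 'out << 5' is 'out * 32' (out ≥ 0 here)
      let out2 := out * 32 + PySem.Chars.find urlFirstChars [c0]
      if out2 < 0 then none else some out2

-- ===== PORT B =====
-- the forward 'for c in url[1:]' loop of B; 'v << shift' is 'v * 2 ^ shift.toNat'
-- (shift stays nonnegative: it starts at 5 and only grows)
def url2idLoopB : List Char → Int → Int → Option Int
  | [], result, _ => some result
  | c :: rest, result, shift =>
    let v := PySem.Chars.find urlOthersChars [c]
    if v < 0 then none
    else url2idLoopB rest (result + v * 2 ^ shift.toNat) (shift + 6)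

def url2id_alt (url : String) : Option Int :=
  let cs := url.toList
  match PySem.List.pyGet? cs 0 with
  | none => none  -- url[0] raises IndexError in Python; excluded by Pre_url2id
  | some c0 =>
    match url2idLoopB cs.tail (PySem.Chars.find urlFirstChars [c0]) 5 with
    | none => none
    | some result => if result ≥ 0 then some result else none

-- ===== PRECONDITION & SPEC =====
-- Pre_ excludes only the empty string, on which both Pythons raise IndexError at url[0].
def Pre_url2id (url : String) : Prop := url ≠ ""
instance (url : String) : Decidable (Pre_url2id url) := by unfold Pre_url2id; infer_instance
def pvWitness_url2id : String := "K3a"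

def Spec_url2id (url : String) (out : Option Int) : Prop := out = url2id_alt url
instance (url : String) (out : Option Int) : Decidable (Spec_url2id url out) := by unfold Spec_url2id; infer_instance

-- ===== CLAIM (what is proved, stated in full; the proofs are below) =====
def Claim_equal_url2id : Prop := ∀ (url : String), Dom_url2id url → Pre_url2id url → Spec_url2id url (url2id url)

-- ===== LEMMAS AND PROOFS =====

-- value of the tail as a little-endian base-64 number, none on an invalid char
def tailVal : List Char → Option Int
  | [] => some 0
  | c :: rest =>
    let v := PySem.Chars.find urlOthersChars [c]
    if v < 0 then none else (tailVal rest).map (fun t => v + 64 * t)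

lemma tailVal_nonneg : ∀ (cs : List Char) (t : Int), tailVal cs = some t → 0 ≤ t := by
  intro cs
  induction cs with
  | nil => intro t h; simp [tailVal] at h; omega
  | cons c rest ih =>
    intro t h
    simp only [tailVal] at h
    split at h
    · exact absurd h (by simp)
    · rename_i hv
      rcases Option.map_eq_some_iff.mp h with ⟨t', ht', rfl⟩
      have := ih t' ht'
      omega

lemma loopA_append (l1 l2 : List Char) (out : Int) :
    url2idLoopA (l1 ++ l2) out =
      match url2idLoopA l1 out with
      | none => none
      | some o => url2idLoopA l2 o := by
  induction l1 generalizing out with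
  | nil => simp [url2idLoopA]
  | cons c rest ih =>
    simp only [List.cons_append, url2idLoopA]
    split
    · rfl
    · exact ih _

lemma loopA_spec (cs : List Char) (out : Int) :
    url2idLoopA cs.reverse out =
      (tailVal cs).map (fun t => t + out * 64 ^ cs.length) := by
  induction cs generalizing out with
  | nil => simp [url2idLoopA, tailVal]
  | cons c rest ih =>
    rw [List.reverse_cons, loopA_append, ih]
    simp only [tailVal]
    cases htv : tailVal rest with
    | none => simp
    | some t =>
      simp only [Option.map_some, url2idLoopA]
      split
      · simp
      · simp only [Option.map_some]
        congr 1
        simp only [List.length_cons]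
        ring

lemma loopB_spec (cs : List Char) (r s : Int) (hs : 0 ≤ s) :
    url2idLoopB cs r s = (tailVal cs).map (fun t => r + t * 2 ^ s.toNat) := by
  induction cs generalizing r s with
  | nil => simp [url2idLoopB, tailVal]
  | cons c rest ih =>
    simp only [url2idLoopB, tailVal]
    split
    · simp
    · rw [ih _ _ (by omega)]
      cases htv : tailVal rest with
      | none => simp
      | some t =>
        simp only [Option.map_some]
        congr 1
        have h6 : (s + 6).toNat = s.toNat + 6 := by omega
        rw [h6, pow_add]
        ring

lemma filterMap_getElem_range {α : Type} (l : List α) :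
    (List.range l.length).filterMap (fun i => l[i]?) = l := by
  induction l using List.reverseRecOn with
  | nil => simp
  | append_singleton l a ih =>
    rw [List.length_append, List.length_singleton, List.range_succ, List.filterMap_append]
    have h1 : (List.range l.length).filterMap (fun i => (l ++ [a])[i]?) = l := by
      rw [List.filterMap_congr (g := fun i => l[i]?), ih]
      intro i hi
      rw [List.mem_range] at hi
      rw [List.getElem?_append_left hi]
    rw [h1]
    simp

lemma slice_rev_tail (cs : List Char) :
    PySem.List.slice? cs none (some 0) (-1) = some cs.tail.reverse := by
  simp only [PySem.List.slice?, PySem.List.sliceIndices]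
  norm_num
  rcases cs with _ | ⟨c, rest⟩
  · simp
  · have hlen : (c :: rest).length = rest.length + 1 := by simp
    rw [hlen]
    rcases Nat.eq_zero_or_pos rest.length with h0 | h0
    · simp [List.length_eq_zero_iff.mp h0]
    · have h1 : (1:ℕ) < rest.length + 1 := by omega
      rw [if_pos h1]
      have hmin : min (0:ℤ) (↑(rest.length + 1) - 1) = 0 := by
        apply min_eq_left; push_cast; omega
      rw [hmin]
      have hcount : ((↑(rest.length + 1) : ℤ) - 1 - 0).toNat = rest.length := by
        push_cast; omega
      rw [hcount]
      have hrevlen : rest.length = (c :: rest).tail.reverse.length := by simp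
      rw [List.filterMap_congr (g := fun i => (c :: rest).tail.reverse[i]?)]
      · rw [hrevlen, filterMap_getElem_range]
      · intro x hx
        rw [List.mem_range] at hx
        have hidx : ((↑(rest.length + 1) : ℤ) - 1 + -↑x).toNat = rest.length - x := by
          push_cast; omega
        rw [hidx]
        have hx1 : rest.length - x < (c :: rest).length := by simp only [List.length_cons]; omega
        have hx2 : x < (c :: rest).tail.reverse.length := by simpa using hx
        rw [List.getElem?_eq_getElem hx1, List.getElem?_eq_getElem hx2]
        congr 1
        rw [List.getElem_reverse]
        simp only [List.tail_cons]
        have hstep : rest.length - x = (rest.length - 1 - x) + 1 := by omega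
        simp only [hstep, List.getElem_cons_succ]

lemma toList_ne_nil_of_ne_empty {url : String} (h : url ≠ "") : url.toList ≠ [] := by
  intro hnil
  apply h
  have := congrArg String.ofList hnil
  simpa using this

-- ===== VERDICT (by name: the statement is the Claim_ definition above) =====
theorem url2id_spec : Claim_equal_url2id := by
  intro url _ hpre
  unfold Spec_url2id url2id url2id_alt
  obtain ⟨c0, rest, hcs⟩ : ∃ c0 rest, url.toList = c0 :: rest := by
    rcases h : url.toList with _ | ⟨c0, rest⟩
    · exact absurd h (toList_ne_nil_of_ne_empty hpre)
    · exact ⟨c0, rest, rfl⟩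
  simp only [hcs, slice_rev_tail, Option.getD_some, List.tail_cons,
    PySem.List.pyGet?_zero_cons]
  rw [loopA_spec, loopB_spec _ _ _ (by omega)]
  cases htv : tailVal rest with
  | none => simp
  | some t =>
    have ht : 0 ≤ t := tailVal_nonneg rest t htv
    simp only [Option.map_some]
    have h32 : (2:Int) ^ ((5:Int).toNat) = 32 := by decide
    rw [h32]
    have harith : t + 0 * 64 ^ rest.length = t := by ring
    rw [harith]
    by_cases hneg : t * 32 + PySem.Chars.find urlFirstChars [c0] < 0
    · rw [if_pos hneg, if_neg (by omega)]
    · rw [if_neg hneg, if_pos (by omega)]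
      congr 1
      ring
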